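-- pv_equiv track=rewrite | github.com/MrBrantCode/unitest_baseline | mut_generate/mist_train_cf/cf_95395/solution.py | find_unique_prime_combinations
-- ===== SOURCE A (Python) =====
-- def is_prime(n):
--     if n <= 1:
--         return False
--     for i in range(2, int(n**0.5) + 1):
--         if n % i == 0:
--             return False
--     return True
--
-- def find_unique_prime_combinations(numbers):
--     combinations = set()
--     n = len(numbers)
--     for i in range(n-2):
--         for j in range(i+1, n-1):
--             for k in range(j+1, n):
--                 combination = [numbers[i], numbers[j], numbers[k]]
--                 if all(map(is_prime, combination)):
--                     combinations.add(tuple(sorted(combination)))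
--     return combinations
-- ===== SOURCE B (Python) =====
-- def _is_prime(n):
--     if n < 2:
--         return False
--     return all(n % d for d in range(2, int(n ** 0.5) + 1))
--
--
-- def find_unique_prime_combinations(numbers):
--     primes = [x for x in numbers if _is_prime(x)]
--     result = set()
--     t = primes
--     while len(t) >= 3:
--         a, t = t[0], t[1:]
--         u = t
--         while len(u) >= 2:
--             b, u = u[0], u[1:]
--             for c in u:
--                 result.add(tuple(sorted((a, b, c))))
--     return result
-- ===== Notes on version B (the rewrite author's own statement) =====
-- stated objective: faster
-- what changed: B tests primality once per element, filters the list to its primes, and enumerates the index triples of that shorter list by suffix recursion, instead of A's triple index loop over the whole input with three primality tests per candidate triple.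
import Mathlib
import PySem

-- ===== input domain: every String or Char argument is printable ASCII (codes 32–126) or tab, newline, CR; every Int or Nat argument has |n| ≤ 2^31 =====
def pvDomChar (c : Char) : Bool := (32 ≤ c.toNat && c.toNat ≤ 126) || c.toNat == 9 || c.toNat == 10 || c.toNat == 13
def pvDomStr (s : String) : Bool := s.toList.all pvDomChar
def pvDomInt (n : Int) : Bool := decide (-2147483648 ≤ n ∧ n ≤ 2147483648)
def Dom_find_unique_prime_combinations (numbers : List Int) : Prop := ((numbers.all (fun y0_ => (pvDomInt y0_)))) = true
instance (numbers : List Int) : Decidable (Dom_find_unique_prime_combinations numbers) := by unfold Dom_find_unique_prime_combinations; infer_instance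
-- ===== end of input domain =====

-- B precomputes primality once and enumerates index triples over the pre-filtered
-- prime list by suffix recursion, instead of A's triple index loop over the whole
-- list with a primality test per triple (objective: faster, asymptotic).


-- ===== PORT A =====
-- int(n**0.5) is ported as Nat.sqrt; exact for 0 ≤ n ≤ 2^31 (the stated domain).
def is_prime (n : Int) : Bool :=
  if n ≤ 1 then false
  else
    -- 'for i in range(...): if n % i == 0: return False' / 'return True'
    (PySem.List.pyRange 2 (((Int.toNat n).sqrt : Int) + 1) 1).all
      (fun i => !(PySem.Int.mod n i == 0))

def find_unique_prime_combinations (numbers : List Int) : List (List Int) :=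
  let n : Int := numbers.length
  (PySem.List.pyRange 0 (n - 2) 1).foldl (fun acc i =>
    (PySem.List.pyRange (i + 1) (n - 1) 1).foldl (fun acc j =>
      (PySem.List.pyRange (j + 1) n 1).foldl (fun acc k =>
        let combination : List Int :=
          [PySem.List.pyGetD numbers i 0, PySem.List.pyGetD numbers j 0,
           PySem.List.pyGetD numbers k 0]
        if combination.all is_prime then
          PySem.Set.add acc (PySem.List.sorted combination (fun x => x) false)
        else acc) acc) acc)
    PySem.Set.empty

-- ===== PORT B =====
def is_prime_b (n : Int) : Bool :=
  if n < 2 then false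
  else
    (PySem.List.pyRange 2 (((Int.toNat n).sqrt : Int) + 1) 1).all
      (fun d => !(PySem.Int.mod n d == 0))

-- 'for c in u: result.add(tuple(sorted((a, b, c))))'
def pvAddTriples (a b : Int) (u : List Int) (acc : PySem.Set (List Int)) :
    PySem.Set (List Int) :=
  u.foldl (fun acc c => PySem.Set.add acc (PySem.List.sorted [a, b, c] (fun x => x) false)) acc

-- 'while len(u) >= 2: b, u = u[0], u[1:]; for c in u: ...'
def pvLoop2 (a : Int) : List Int → PySem.Set (List Int) → PySem.Set (List Int)
  | b :: u@(_ :: _), acc => pvLoop2 a u (pvAddTriples a b u acc)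
  | _, acc => acc

-- 'while len(t) >= 3: a, t = t[0], t[1:]; ...'
def pvLoop1 : List Int → PySem.Set (List Int) → PySem.Set (List Int)
  | a :: t@(_ :: _ :: _), acc => pvLoop1 t (pvLoop2 a t acc)
  | _, acc => acc

def find_unique_prime_combinations_alt (numbers : List Int) : List (List Int) :=
  pvLoop1 (numbers.filter is_prime_b) PySem.Set.empty

-- ===== PRECONDITION & SPEC =====
def Spec_find_unique_prime_combinations (numbers : List Int) (out : List (List Int)) : Prop := out = find_unique_prime_combinations_alt numbers
instance (numbers : List Int) (out : List (List Int)) : Decidable (Spec_find_unique_prime_combinations numbers out) := by unfold Spec_find_unique_prime_combinations; infer_instance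

-- ===== CLAIM (what is proved, stated in full; the proofs are below) =====
def Claim_equal_find_unique_prime_combinations : Prop := ∀ (numbers : List Int), Dom_find_unique_prime_combinations numbers → Spec_find_unique_prime_combinations numbers (find_unique_prime_combinations numbers)

-- ===== LEMMAS AND PROOFS =====

lemma is_prime_b_eq : is_prime_b = is_prime := by
  funext n
  unfold is_prime is_prime_b
  rcases lt_or_ge n 2 with h | h
  · rw [if_pos h, if_pos (by omega)]
  · rw [if_neg (by omega), if_neg (by omega)]

-- all ordered pairs (xs[j], xs[k]) with j < k, in loop order
def pvPairs : List Int → List (Int × Int)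
  | [] => []
  | b :: u => u.map (fun c => (b, c)) ++ pvPairs u

-- all ordered triples (xs[i], xs[j], xs[k]) with i < j < k, in loop order
def pvTrips : List Int → List (Int × Int × Int)
  | [] => []
  | a :: t => (pvPairs t).map (fun bc => (a, bc.1, bc.2)) ++ pvTrips t

lemma pvPairs_short (l : List Int) (h : l.length ≤ 1) : pvPairs l = [] := by
  match l, h with
  | [], _ => rfl
  | [b], _ => simp [pvPairs]

lemma pvTrips_short (l : List Int) (h : l.length ≤ 2) : pvTrips l = [] := by
  match l, h with
  | [], _ => rfl
  | [a], _ => simp [pvTrips, pvPairs]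
  | [a, b], _ => simp [pvTrips, pvPairs_short]

-- B's inner while-loop is the fold over pvPairs
lemma pvLoop2_eq (a : Int) (t : List Int) (acc : PySem.Set (List Int)) :
    pvLoop2 a t acc =
      (pvPairs t).foldl
        (fun acc bc => PySem.Set.add acc (PySem.List.sorted [a, bc.1, bc.2] (fun x => x) false))
        acc := by
  induction t generalizing acc with
  | nil => simp [pvLoop2, pvPairs]
  | cons b u ih =>
    cases u with
    | nil => simp [pvLoop2, pvPairs]
    | cons c r =>
      rw [show pvLoop2 a (b :: c :: r) acc = pvLoop2 a (c :: r) (pvAddTriples a b (c :: r) acc)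
            from by simp [pvLoop2]]
      rw [ih]
      simp only [pvPairs, List.foldl_append, List.foldl_map]
      rfl

-- B's outer while-loop is the fold over pvTrips
lemma pvLoop1_eq (t : List Int) (acc : PySem.Set (List Int)) :
    pvLoop1 t acc =
      (pvTrips t).foldl
        (fun acc tr =>
          PySem.Set.add acc (PySem.List.sorted [tr.1, tr.2.1, tr.2.2] (fun x => x) false))
        acc := by
  induction t generalizing acc with
  | nil => simp [pvLoop1, pvTrips]
  | cons a t ih =>
    match t with
    | [] => simp [pvLoop1, pvTrips, pvPairs]
    | [b] => simp [pvLoop1, pvTrips, pvPairs]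
    | b :: c :: r =>
      rw [show pvLoop1 (a :: b :: c :: r) acc
            = pvLoop1 (b :: c :: r) (pvLoop2 a (b :: c :: r) acc) from by simp [pvLoop1]]
      rw [ih, pvLoop2_eq]
      simp only [pvTrips, List.foldl_append, List.foldl_map]

lemma pvPairs_filter (p : Int → Bool) (t : List Int) :
    pvPairs (t.filter p) = (pvPairs t).filter (fun bc => p bc.1 && p bc.2) := by
  induction t with
  | nil => rfl
  | cons b u ih =>
    by_cases h : p b = true
    · simp [pvPairs, h, ih, List.filter_append, List.filter_map, Function.comp_def]
    · simp only [Bool.not_eq_true] at h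
      simp [pvPairs, h, ih, List.filter_append, List.filter_map, Function.comp_def]

lemma pvTrips_filter (p : Int → Bool) (t : List Int) :
    pvTrips (t.filter p) = (pvTrips t).filter (fun tr => p tr.1 && p tr.2.1 && p tr.2.2) := by
  induction t with
  | nil => rfl
  | cons a u ih =>
    by_cases h : p a = true
    · simp [pvTrips, h, ih, pvPairs_filter, List.filter_append, List.filter_map,
        Function.comp_def, Bool.and_assoc]
    · simp only [Bool.not_eq_true] at h
      simp [pvTrips, h, ih, List.filter_append, List.filter_map, Function.comp_def]

-- A's innermost index loop is a fold over the suffix xs.drop a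
lemma pvIdx1 {S : Type} (xs : List Int) (f : S → Int → S) :
    ∀ (a : Nat) (init : S),
      (PySem.List.pyRange (a : Int) (xs.length : Int) 1).foldl
        (fun acc k => f acc (PySem.List.pyGetD xs k 0)) init
      = (xs.drop a).foldl f init := by
  intro a
  induction hn : xs.length - a generalizing a with
  | zero =>
    intro init
    have h : xs.length ≤ a := by omega
    rw [PySem.List.pyRange_one_eq_nil (by exact_mod_cast h), List.drop_of_length_le h]
    rfl
  | succ m ih =>
    intro init
    have h : a < xs.length := by omega
    rw [PySem.List.pyRange_one_cons (by exact_mod_cast h)]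
    rw [List.drop_eq_getElem_cons h]
    simp only [List.foldl_cons]
    rw [show ((a : Int) + 1) = ((a + 1 : Nat) : Int) by push_cast; ring]
    rw [ih (a + 1) (by omega)]
    congr 1
    simp [PySem.List.pyGetD_natCast, List.getD_eq_getElem?_getD, h]

-- A's middle+inner index loops are a fold over pvPairs of the suffix
lemma pvIdx2 {S : Type} (xs : List Int) (g : S → Int → Int → S) :
    ∀ (a : Nat) (init : S),
      (PySem.List.pyRange (a : Int) ((xs.length : Int) - 1) 1).foldl
        (fun acc j =>
          (PySem.List.pyRange (j + 1) (xs.length : Int) 1).foldl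
            (fun acc k => g acc (PySem.List.pyGetD xs j 0) (PySem.List.pyGetD xs k 0)) acc)
        init
      = (pvPairs (xs.drop a)).foldl (fun acc bc => g acc bc.1 bc.2) init := by
  intro a
  induction hn : xs.length - 1 - a generalizing a with
  | zero =>
    intro init
    have h : (xs.length : Int) - 1 ≤ (a : Int) := by omega
    rw [PySem.List.pyRange_one_eq_nil h]
    rw [pvPairs_short _ (by simp [List.length_drop]; omega)]
    rfl
  | succ m ih =>
    intro init
    have h : a + 1 < xs.length := by omega
    rw [PySem.List.pyRange_one_cons (by omega)]
    simp only [List.foldl_cons]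
    rw [List.drop_eq_getElem_cons (by omega : a < xs.length)]
    rw [show ((a : Int) + 1) = ((a + 1 : Nat) : Int) by push_cast; ring]
    rw [pvIdx1 xs (fun acc c => g acc (PySem.List.pyGetD xs (a : Int) 0) c) (a + 1)]
    rw [ih (a + 1) (by omega)]
    simp only [pvPairs, List.foldl_append, List.foldl_map]
    congr 2
    · funext acc c
      congr 1
      simp [PySem.List.pyGetD_natCast, List.getD_eq_getElem?_getD, (by omega : a < xs.length)]

-- all three of A's index loops are a fold over pvTrips of the suffix
lemma pvIdx3 {S : Type} (xs : List Int) (g : S → Int → Int → Int → S) :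
    ∀ (a : Nat) (init : S),
      (PySem.List.pyRange (a : Int) ((xs.length : Int) - 2) 1).foldl
        (fun acc i =>
          (PySem.List.pyRange (i + 1) ((xs.length : Int) - 1) 1).foldl
            (fun acc j =>
              (PySem.List.pyRange (j + 1) (xs.length : Int) 1).foldl
                (fun acc k =>
                  g acc (PySem.List.pyGetD xs i 0) (PySem.List.pyGetD xs j 0)
                    (PySem.List.pyGetD xs k 0)) acc) acc)
        init
      = (pvTrips (xs.drop a)).foldl (fun acc tr => g acc tr.1 tr.2.1 tr.2.2) init := by
  intro a
  induction hn : xs.length - 2 - a generalizing a with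
  | zero =>
    intro init
    have h : (xs.length : Int) - 2 ≤ (a : Int) := by omega
    rw [PySem.List.pyRange_one_eq_nil h]
    rw [pvTrips_short _ (by simp [List.length_drop]; omega)]
    rfl
  | succ m ih =>
    intro init
    have h : a + 2 < xs.length := by omega
    rw [PySem.List.pyRange_one_cons (by omega)]
    simp only [List.foldl_cons]
    rw [List.drop_eq_getElem_cons (by omega : a < xs.length)]
    rw [show ((a : Int) + 1) = ((a + 1 : Nat) : Int) by push_cast; ring]
    rw [pvIdx2 xs (fun acc b c => g acc (PySem.List.pyGetD xs (a : Int) 0) b c) (a + 1)]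
    rw [ih (a + 1) (by omega)]
    simp only [pvTrips, List.foldl_append, List.foldl_map]
    congr 2
    · funext acc bc
      congr 1
      simp [PySem.List.pyGetD_natCast, List.getD_eq_getElem?_getD, (by omega : a < xs.length)]

-- ===== VERDICT (by name: the statement is the Claim_ definition above) =====
theorem find_unique_prime_combinations_spec : Claim_equal_find_unique_prime_combinations := by
  intro numbers _
  show find_unique_prime_combinations numbers = find_unique_prime_combinations_alt numbers
  have hA := pvIdx3 numbers
    (fun acc x y z =>
      if ([x, y, z]).all is_prime then
        PySem.Set.add acc (PySem.List.sorted [x, y, z] (fun x => x) false)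
      else acc) 0 PySem.Set.empty
  rw [List.drop_zero] at hA
  rw [show find_unique_prime_combinations numbers
        = (pvTrips numbers).foldl
            (fun acc tr =>
              if ([tr.1, tr.2.1, tr.2.2]).all is_prime then
                PySem.Set.add acc (PySem.List.sorted [tr.1, tr.2.1, tr.2.2] (fun x => x) false)
              else acc) PySem.Set.empty
      from hA]
  unfold find_unique_prime_combinations_alt
  rw [pvLoop1_eq, is_prime_b_eq]
  rw [PySem.List.foldl_if_eq_foldl_filter
    (p := fun tr : Int × Int × Int => ([tr.1, tr.2.1, tr.2.2]).all is_prime)]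
  rw [pvTrips_filter]
  congr 1
  apply List.filter_congr
  intro tr _
  simp [Bool.and_assoc]
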